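-- pv_equiv track=rewrite | github.com/goldenmean/python | find_bonus.py | find_bonus
-- ===== SOURCE A (Python) =====
-- def find_bonus(perf):
--     bonus = [1]*len(perf)
--
--     for i in range(len(perf)):
--         if i == 0 and i < len(perf)-1:
--             bonus[i] = (bonus[i] + 1) if perf[i] > perf[i+1] else bonus[i]
--         elif i > 0 and i < len(perf)-1:
--             if perf[i] > perf[i+1] and perf[i] > perf[i-1]:
--                 bonus[i] = (bonus[i] + 2)
--             elif perf[i] > perf[i+1] or perf[i] > perf[i-1]:
--                 bonus[i] = (bonus[i] + 1)
--             else: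
--                 bonus[i] = bonus[i]
--
--         elif i == len(perf)-1:
--             bonus[i] = (bonus[i] + 1) if perf[i] > perf[i-1] else bonus[i]
--
--     return bonus
-- ===== SOURCE B (Python) =====
-- def find_bonus(perf):
--     bonus = [1] * len(perf)
--     for i in range(len(perf) - 1):
--         if perf[i] > perf[i + 1]:
--             bonus[i] += 1
--         if perf[i + 1] > perf[i]:
--             bonus[i + 1] += 1
--     return bonus
-- ===== Notes on version B (the rewrite author's own statement) =====
-- stated objective: simpler
-- what changed: B accumulates each element's bonus from its adjacent pairs: one loop over edges (i,i+1) incrementing whichever endpoint is strictly larger, instead of A's per-node three-way branch over first/interior/last positions with two-sided neighbor lookups.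
import Mathlib
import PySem

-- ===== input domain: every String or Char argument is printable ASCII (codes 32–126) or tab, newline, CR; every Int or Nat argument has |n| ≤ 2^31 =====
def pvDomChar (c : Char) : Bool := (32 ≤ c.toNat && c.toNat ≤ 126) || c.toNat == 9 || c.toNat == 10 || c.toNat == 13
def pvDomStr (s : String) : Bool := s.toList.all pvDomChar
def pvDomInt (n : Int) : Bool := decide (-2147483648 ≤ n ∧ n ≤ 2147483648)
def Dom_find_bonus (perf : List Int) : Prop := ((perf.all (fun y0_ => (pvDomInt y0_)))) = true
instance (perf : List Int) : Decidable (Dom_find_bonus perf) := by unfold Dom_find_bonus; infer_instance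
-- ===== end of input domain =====

-- B replaces A's per-node first/interior/last branching by a single loop over adjacent
-- pairs that credits whichever endpoint of each edge is strictly larger (simpler decomposition, same cost).

-- ===== PORT A =====
-- loop body of A: for i in range(len(perf)) with the three positional branches
def stepA (perf : List Int) (bonus : List Int) (i : Int) : List Int :=
  let n : Int := PySem.List.len perf
  if i = 0 ∧ i < n - 1 then
    PySem.List.pySetD bonus i
      (if PySem.List.pyGetD perf (i+1) 0 < PySem.List.pyGetD perf i 0
       then PySem.List.pyGetD bonus i 0 + 1 else PySem.List.pyGetD bonus i 0)
  else if 0 < i ∧ i < n - 1 then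
    if PySem.List.pyGetD perf (i+1) 0 < PySem.List.pyGetD perf i 0 ∧
       PySem.List.pyGetD perf (i-1) 0 < PySem.List.pyGetD perf i 0 then
      PySem.List.pySetD bonus i (PySem.List.pyGetD bonus i 0 + 2)
    else if PySem.List.pyGetD perf (i+1) 0 < PySem.List.pyGetD perf i 0 ∨
            PySem.List.pyGetD perf (i-1) 0 < PySem.List.pyGetD perf i 0 then
      PySem.List.pySetD bonus i (PySem.List.pyGetD bonus i 0 + 1)
    else
      PySem.List.pySetD bonus i (PySem.List.pyGetD bonus i 0)
  else if i = n - 1 then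
    PySem.List.pySetD bonus i
      (if PySem.List.pyGetD perf (i-1) 0 < PySem.List.pyGetD perf i 0
       then PySem.List.pyGetD bonus i 0 + 1 else PySem.List.pyGetD bonus i 0)
  else bonus

def find_bonus (perf : List Int) : List Int :=
  (PySem.List.pyRange 0 (PySem.List.len perf) 1).foldl (stepA perf)
    (List.replicate perf.length 1)

-- ===== PORT B =====
-- loop body of B: for i in range(len(perf)-1), credit each endpoint of edge (i, i+1)
def stepB (perf : List Int) (bonus : List Int) (i : Int) : List Int :=
  let bonus1 :=
    if PySem.List.pyGetD perf (i+1) 0 < PySem.List.pyGetD perf i 0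
    then PySem.List.pySetD bonus i (PySem.List.pyGetD bonus i 0 + 1) else bonus
  if PySem.List.pyGetD perf i 0 < PySem.List.pyGetD perf (i+1) 0
  then PySem.List.pySetD bonus1 (i+1) (PySem.List.pyGetD bonus1 (i+1) 0 + 1) else bonus1

def find_bonus_alt (perf : List Int) : List Int :=
  (PySem.List.pyRange 0 (PySem.List.len perf - 1) 1).foldl (stepB perf)
    (List.replicate perf.length 1)

-- ===== PRECONDITION & SPEC =====
def Spec_find_bonus (perf : List Int) (out : List Int) : Prop := out = find_bonus_alt perf
instance (perf : List Int) (out : List Int) : Decidable (Spec_find_bonus perf out) := by unfold Spec_find_bonus; infer_instance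

-- ===== CLAIM (what is proved, stated in full; the proofs are below) =====
def Claim_equal_find_bonus : Prop := ∀ (perf : List Int), Dom_find_bonus perf → Spec_find_bonus perf (find_bonus perf)

-- ===== LEMMAS AND PROOFS =====

-- the common closed form both loops compute: 1 + one point per strictly smaller neighbor
def lwin (perf : List Int) (j : Nat) : Int :=
  if 0 < j ∧ perf.getD (j-1) 0 < perf.getD j 0 then 1 else 0

def rwin (perf : List Int) (j : Nat) : Int :=
  if j + 1 < perf.length ∧ perf.getD (j+1) 0 < perf.getD j 0 then 1 else 0

lemma getD_map_range' (n k : Nat) (f : Nat → Int) (d : Int) (hk : k < n) :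
    ((List.range n).map f).getD k d = f k := by
  simp [List.getD, hk]

lemma set_map_range (n k : Nat) (f : Nat → Int) (v : Int) :
    ((List.range n).map f).set k v
      = (List.range n).map (fun j => if j = k then v else f j) := by
  apply List.ext_getElem
  · simp
  · intro i h1 h2
    simp only [List.length_set, List.length_map, List.length_range] at h1
    rcases eq_or_ne i k with rfl | hik
    · rw [List.getElem_set_self (by simpa using h1)]
      simp
    · rw [List.getElem_set_ne (Ne.symm hik)]
      simp [hik]

lemma replicate_eq_map (n : Nat) :
    List.replicate n (1 : Int) = (List.range n).map (fun _ => 1) := by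
  induction n with
  | zero => rfl
  | succ m ih => rw [List.range_succ, List.map_append, ← ih, List.replicate_succ']; rfl

lemma pyGetD_nat (xs : List Int) (k : Nat) :
    PySem.List.pyGetD xs (k : Int) 0 = xs.getD k 0 := by
  simp [PySem.List.pyGetD_natCast]

lemma stepA_eq (perf bonus : List Int) (k : Nat) (hk : k < perf.length)
    (hb : PySem.List.pyGetD bonus (k : Int) 0 = 1) :
    stepA perf bonus (k : Int)
      = PySem.List.pySetD bonus (k : Int) (1 + lwin perf k + rwin perf k) := by
  unfold stepA
  simp only [PySem.List.len_eq, hb]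
  have hget : PySem.List.pyGetD perf ((k : Int) + 1) 0 = perf.getD (k+1) 0 := by
    rw [show ((k : Int) + 1) = ((k+1 : Nat) : Int) by push_cast; ring, pyGetD_nat]
  by_cases h0 : k = 0
  · subst h0
    by_cases hl : ((0:Nat) : Int) < (perf.length : Int) - 1
    · rw [if_pos ⟨rfl, hl⟩]
      congr 1
      rw [hget, pyGetD_nat]
      simp only [lwin, rwin]
      have : 0 + 1 < perf.length := by exact_mod_cast (by omega : (0:Int) + 1 < (perf.length:Int))
      split_ifs <;> omega
    · -- len = 1 : the last-element branch fires with perf[-1] = perf[0]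
      have hn1 : perf.length = 1 := by
        have : ¬ ((0:Int) < (perf.length : Int) - 1) := by simpa using hl
        omega
      rcases perf with _ | ⟨x, rest⟩
      · simp at hn1
      · have : rest = [] := by simpa using hn1
        subst this
        simp [lwin, rwin, PySem.List.pyGetD, PySem.List.pyGet?, PySem.List.pyIdx?]
  · -- k > 0
    have h0' : 0 < k := Nat.pos_of_ne_zero h0
    have hk0 : (0 : Int) < (k : Int) := by exact_mod_cast h0'
    have hgetm : PySem.List.pyGetD perf ((k : Int) - 1) 0 = perf.getD (k-1) 0 := by
      rw [show ((k : Int) - 1) = ((k-1 : Nat) : Int) by push_cast [h0']; ring, pyGetD_nat]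
    by_cases hl : (k : Int) < (perf.length : Int) - 1
    · rw [if_neg (by intro h; exact h0 (by exact_mod_cast h.1)), if_pos ⟨hk0, hl⟩]
      rw [hget, hgetm, pyGetD_nat]
      have hlt : k + 1 < perf.length := by exact_mod_cast (by omega : ((k:Int)+1) < (perf.length:Int))
      simp only [lwin, rwin]
      split_ifs <;> first | rfl | (congr 1; omega)
    · -- k = len - 1 > 0
      have hke : (k : Int) = (perf.length : Int) - 1 := by
        have : (k : Int) < (perf.length : Int) := by exact_mod_cast hk
        omega
      rw [if_neg (by intro h; exact h0 (by exact_mod_cast h.1)),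
          if_neg (by intro h; exact hl h.2), if_pos hke]
      congr 1
      rw [hgetm, pyGetD_nat]
      have : ¬ (k + 1 < perf.length) := by
        intro h
        exact hl (by exact_mod_cast (by omega : (k:Int) < (perf.length:Int) - 1))
      simp only [lwin, rwin]
      split_ifs <;> omega

-- invariant of A's loop: after k steps, the first k entries carry their final score
lemma foldA (perf : List Int) (k : Nat) (hk : k ≤ perf.length) :
    (PySem.List.pyRange 0 (k : Int) 1).foldl (stepA perf) (List.replicate perf.length 1)
      = (List.range perf.length).map
          (fun j => if j < k then 1 + lwin perf j + rwin perf j else 1) := by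
  induction k with
  | zero =>
      rw [PySem.List.pyRange_one_eq_nil (by norm_num), List.foldl_nil, replicate_eq_map]
      apply List.map_congr_left
      intro j hj
      rw [if_neg (by omega)]
  | succ k ih =>
      have hk' : k ≤ perf.length := by omega
      rw [show ((k+1 : Nat) : Int) = (k : Int) + 1 by push_cast; ring,
          PySem.List.pyRange_one_succ_right (by positivity), List.foldl_append]
      simp only [List.foldl_cons, List.foldl_nil, ih hk']
      rw [stepA_eq perf _ k (by omega)
        (by rw [pyGetD_nat, getD_map_range' _ _ _ _ (by omega)]; simp)]
      rw [PySem.List.pySetD_natCast, set_map_range]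
      apply List.map_congr_left
      intro j hj
      by_cases h : j = k
      · subst h; simp
      · simp only [if_neg h]
        by_cases h2 : j < k
        · rw [if_pos h2, if_pos (by omega)]
        · rw [if_neg h2, if_neg (by omega)]

-- invariant of B's loop: after k edges, index j holds 1 + (left credit if edge j-1 done) + (right credit if edge j done)
lemma stepB_eq (perf : List Int) (k : Nat) (hk : k + 1 < perf.length) :
    stepB perf
        ((List.range perf.length).map
          (fun j => 1 + (if j ≤ k then lwin perf j else 0) + (if j < k then rwin perf j else 0)))
        (k : Int)
      = (List.range perf.length).map
          (fun j => 1 + (if j ≤ k+1 then lwin perf j else 0) + (if j < k+1 then rwin perf j else 0)) := by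
  unfold stepB
  have hget : PySem.List.pyGetD perf ((k : Int) + 1) 0 = perf.getD (k+1) 0 := by
    rw [show ((k : Int) + 1) = ((k+1 : Nat) : Int) by push_cast; ring, pyGetD_nat]
  rw [hget, pyGetD_nat]
  set f : Nat → Int := fun j =>
    1 + (if j ≤ k then lwin perf j else 0) + (if j < k then rwin perf j else 0) with hf
  have hfk : PySem.List.pyGetD ((List.range perf.length).map f) (k : Int) 0 = 1 + lwin perf k := by
    rw [pyGetD_nat, getD_map_range' _ _ _ _ (by omega)]; simp [hf]
  by_cases c1 : perf.getD (k+1) 0 < perf.getD k 0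
  · -- left endpoint wins the edge; the right cannot
    have c2 : ¬ perf.getD k 0 < perf.getD (k+1) 0 := by omega
    rw [if_pos c1, hfk, if_neg c2, PySem.List.pySetD_natCast, set_map_range]
    apply List.map_congr_left
    intro j hj
    simp only [List.mem_range] at hj
    simp only [hf, lwin, rwin]
    rcases eq_or_ne j k with rfl | hjk
    · split_ifs <;> omega
    · rcases eq_or_ne j (k+1) with rfl | hjk1
      · simp only [Nat.add_sub_cancel]
        split_ifs <;> omega
      · split_ifs <;> omega
  · rw [if_neg c1]
    by_cases c2 : perf.getD k 0 < perf.getD (k+1) 0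
    · -- right endpoint wins the edge
      rw [if_pos c2]
      have hfk1 : PySem.List.pyGetD ((List.range perf.length).map f) ((k : Int) + 1) 0 = 1 := by
        rw [show ((k : Int) + 1) = ((k+1 : Nat) : Int) by push_cast; ring,
            pyGetD_nat, getD_map_range' _ _ _ _ (by omega)]
        simp [hf]
      rw [hfk1, show ((k : Int) + 1) = ((k+1 : Nat) : Int) by push_cast; ring,
          PySem.List.pySetD_natCast, set_map_range]
      apply List.map_congr_left
      intro j hj
      simp only [List.mem_range] at hj
      simp only [hf, lwin, rwin]
      rcases eq_or_ne j k with rfl | hjk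
      · split_ifs <;> omega
      · rcases eq_or_ne j (k+1) with rfl | hjk1
        · simp only [Nat.add_sub_cancel]
          split_ifs <;> omega
        · split_ifs <;> omega
    · -- tie: neither endpoint gains
      rw [if_neg c2]
      apply List.map_congr_left
      intro j hj
      simp only [List.mem_range] at hj
      simp only [hf, lwin, rwin]
      rcases eq_or_ne j k with rfl | hjk
      · split_ifs <;> omega
      · rcases eq_or_ne j (k+1) with rfl | hjk1
        · simp only [Nat.add_sub_cancel]
          split_ifs <;> omega
        · split_ifs <;> omega

lemma foldB (perf : List Int) (k : Nat) (hk : k + 1 ≤ perf.length) :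
    (PySem.List.pyRange 0 (k : Int) 1).foldl (stepB perf) (List.replicate perf.length 1)
      = (List.range perf.length).map
          (fun j => 1 + (if j ≤ k then lwin perf j else 0) + (if j < k then rwin perf j else 0)) := by
  induction k with
  | zero =>
      rw [PySem.List.pyRange_one_eq_nil (by norm_num)]
      rw [replicate_eq_map]
      apply List.map_congr_left
      intro j hj
      simp only [lwin]
      split_ifs <;> omega
  | succ k ih =>
      have hk' : k + 1 ≤ perf.length := by omega
      rw [show ((k+1 : Nat) : Int) = (k : Int) + 1 by push_cast; ring,
          PySem.List.pyRange_one_succ_right (by positivity), List.foldl_append]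
      simp only [List.foldl_cons, List.foldl_nil, ih hk']
      exact stepB_eq perf k (by omega)

lemma find_bonus_closed (perf : List Int) :
    find_bonus perf = (List.range perf.length).map (fun j => 1 + lwin perf j + rwin perf j) := by
  unfold find_bonus
  rw [PySem.List.len_eq, foldA perf perf.length le_rfl]
  apply List.map_congr_left
  intro j hj
  simp only [List.mem_range] at hj
  rw [if_pos hj]

lemma find_bonus_alt_closed (perf : List Int) :
    find_bonus_alt perf = (List.range perf.length).map (fun j => 1 + lwin perf j + rwin perf j) := by
  unfold find_bonus_alt
  rw [PySem.List.len_eq]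
  rcases Nat.eq_zero_or_pos perf.length with h0 | h0
  · rw [h0]
    rw [PySem.List.pyRange_one_eq_nil (by norm_num)]
    rfl
  · rw [show (perf.length : Int) - 1 = ((perf.length - 1 : Nat) : Int) by push_cast [h0]; ring,
        foldB perf (perf.length - 1) (by omega)]
    apply List.map_congr_left
    intro j hj
    simp only [List.mem_range] at hj
    rw [if_pos (by omega)]
    congr 1
    simp only [rwin]
    split_ifs <;> omega

-- ===== VERDICT (by name: the statement is the Claim_ definition above) =====
theorem find_bonus_spec : Claim_equal_find_bonus := by
  intro perf _
  unfold Spec_find_bonus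
  rw [find_bonus_closed, find_bonus_alt_closed]
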